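-- pv_equiv track=rewrite | github.com/chassardmartin/gysela_compressions | compression/ezw_utils.py | intervals_sort
-- ===== SOURCE A (Python) =====
-- def intervals_sort(l, intervals):
--     sort = []
--     for interval in intervals:
--         down, up = interval
--         who = [x >= down and x < up for x in l]
--
--         step_sort = []
--         for i, x in enumerate(l):
--             if who[i]:
--                 step_sort.append(x)
--         sort += step_sort
--     return sort
-- ===== SOURCE B (Python) =====
-- def intervals_sort(l, intervals):
--     buckets = [[] for _ in intervals]
--     for x in l:
--         for b, (down, up) in zip(buckets, intervals):
--             if down <= x < up:
--                 b.append(x)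
--     out = []
--     for b in buckets:
--         out += b
--     return out
-- ===== Notes on version B (the rewrite author's own statement) =====
-- stated objective: alternative
-- what changed: B makes a single pass over the data, routing each element into one bucket per interval as it goes (transposed loop order, no boolean mask), then concatenates the buckets; A rescans the whole list once per interval building a mask first.
import Mathlib
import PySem

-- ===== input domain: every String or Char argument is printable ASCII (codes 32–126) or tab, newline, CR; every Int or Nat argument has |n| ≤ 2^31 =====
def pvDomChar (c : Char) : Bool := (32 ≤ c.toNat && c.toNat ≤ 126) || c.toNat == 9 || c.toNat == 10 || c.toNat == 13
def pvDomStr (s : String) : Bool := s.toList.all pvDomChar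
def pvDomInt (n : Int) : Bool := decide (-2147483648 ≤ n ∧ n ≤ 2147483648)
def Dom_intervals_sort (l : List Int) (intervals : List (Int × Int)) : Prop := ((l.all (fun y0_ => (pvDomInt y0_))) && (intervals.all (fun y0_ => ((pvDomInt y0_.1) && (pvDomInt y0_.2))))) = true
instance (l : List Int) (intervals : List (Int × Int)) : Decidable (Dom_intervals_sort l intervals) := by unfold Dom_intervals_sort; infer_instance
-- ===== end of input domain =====

-- B makes a single pass over the data, routing each element into per-interval buckets
-- (transposed loop order), instead of A's one full scan of the list per interval; same cost, different structure.


-- ===== PORT A =====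
def intervals_sort (l : List Int) (intervals : List (Int × Int)) : List Int :=
  -- sort = []; for interval in intervals: …
  intervals.foldl (fun sort interval =>
    let down := interval.1
    let up := interval.2
    -- who = [x >= down and x < up for x in l]
    let who : List Bool := l.map (fun x => decide (x ≥ down) && decide (x < up))
    -- step_sort = []; for i, x in enumerate(l): if who[i]: step_sort.append(x)
    let step_sort : List Int :=
      (PySem.List.enumerate l 0).foldl (fun acc q =>
        if (PySem.List.pyGet? who q.1).getD false then acc ++ [q.2] else acc) []
    sort ++ step_sort) []

-- ===== PORT B =====
def intervals_sort_alt (l : List Int) (intervals : List (Int × Int)) : List Int :=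
  -- buckets = [[] for _ in intervals]
  let buckets0 : List (List Int) := intervals.map (fun _ => ([] : List Int))
  -- for x in l: for b, (down, up) in zip(buckets, intervals): if down <= x < up: b.append(x)
  let buckets := l.foldl (fun bs x =>
    List.zipWith (fun b iv => if iv.1 ≤ x ∧ x < iv.2 then b ++ [x] else b) bs intervals) buckets0
  -- out = []; for b in buckets: out += b
  buckets.foldl (fun out b => out ++ b) []

-- ===== PRECONDITION & SPEC =====
def Spec_intervals_sort (l : List Int) (intervals : List (Int × Int)) (out : List Int) : Prop := out = intervals_sort_alt l intervals
instance (l : List Int) (intervals : List (Int × Int)) (out : List Int) : Decidable (Spec_intervals_sort l intervals out) := by unfold Spec_intervals_sort; infer_instance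

-- ===== CLAIM (what is proved, stated in full; the proofs are below) =====
def Claim_equal_intervals_sort : Prop := ∀ (l : List Int) (intervals : List (Int × Int)), Dom_intervals_sort l intervals → Spec_intervals_sort l intervals (intervals_sort l intervals)

-- ===== LEMMAS AND PROOFS =====

-- the membership predicate of one interval, as both ports test it
def pvPred (iv : Int × Int) (x : Int) : Bool := decide (iv.1 ≤ x) && decide (x < iv.2)

-- A's inner loop over enumerate, with who indexed at offset s, is a filter
theorem pvA_inner (p : Int → Bool) :
    ∀ (l0 : List Int) (s : Nat) (who : List Bool) (acc : List Int),
      (∀ (k : Nat) (h : k < l0.length), who[s + k]? = some (p l0[k])) →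
      (PySem.List.enumerate l0 (s : Int)).foldl (fun acc q =>
        if (PySem.List.pyGet? who q.1).getD false then acc ++ [q.2] else acc) acc
      = acc ++ l0.filter p := by
  intro l0
  induction l0 with
  | nil => intro s who acc _; simp [PySem.List.enumerate_nil]
  | cons x t ih =>
    intro s who acc h
    have h0 : who[s]? = some (p x) := by simpa using h 0 (by simp)
    have hget : PySem.List.pyGet? who ((s : Int)) = some (p x) := by
      simpa [PySem.List.pyGet?_natCast] using h0
    have hrec := ih (s + 1) who (if p x then acc ++ [x] else acc)
      (fun k hk => by
        have := h (k + 1) (by simpa using Nat.succ_lt_succ hk)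
        simpa [Nat.add_assoc, Nat.add_comm 1 k] using this)
    have hcast : ((s : Int)) + 1 = ((s + 1 : Nat) : Int) := by push_cast; ring
    rw [PySem.List.enumerate_cons]
    simp only [List.foldl_cons, hget, Option.getD_some, List.filter_cons]
    rw [hcast]
    cases hp : p x <;> simp [hp] at hrec ⊢ <;> rw [hrec]

-- one step of B's outer loop fused into the buckets invariant
theorem pvB_fuse (x : Int) :
    ∀ (c : List (Int × Int)) (a : List (List Int)) (l : List Int),
      List.zipWith (fun b iv => b ++ l.filter (pvPred iv))
        (List.zipWith (fun b iv => if iv.1 ≤ x ∧ x < iv.2 then b ++ [x] else b) a c) c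
      = List.zipWith (fun b iv => b ++ (x :: l).filter (pvPred iv)) a c := by
  intro c
  induction c with
  | nil => intro a l; simp
  | cons iv t ih =>
    intro a l
    cases a with
    | nil => simp
    | cons b bs =>
      simp only [List.zipWith_cons_cons, ih]
      congr 1
      rw [List.filter_cons]
      by_cases hp : iv.1 ≤ x ∧ x < iv.2
      · simp [pvPred, hp.1, hp.2, List.append_assoc]
      · have hb : pvPred iv x = false := by
          simp only [pvPred, Bool.and_eq_false_iff, decide_eq_false_iff_not]
          omega
        simp [hp, hb]

-- zipWith with a length-matching first list and a projection keeps it unchanged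
theorem pvZip_fst : ∀ (a : List (List Int)) (c : List (Int × Int)), a.length = c.length →
    List.zipWith (fun b (_ : Int × Int) => b) a c = a := by
  intro a
  induction a with
  | nil => intro c _; simp
  | cons b bs ih =>
    intro c hc
    cases c with
    | nil => simp at hc
    | cons iv t => simp only [List.zipWith_cons_cons, ih t (by simpa using hc)]

-- B's main loop maintains: bucket j = init j ++ filter of the processed prefix
theorem pvB_loop (intervals : List (Int × Int)) :
    ∀ (l : List Int) (init : List (List Int)), init.length = intervals.length →
      l.foldl (fun bs x =>
        List.zipWith (fun b iv => if iv.1 ≤ x ∧ x < iv.2 then b ++ [x] else b) bs intervals) init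
      = List.zipWith (fun b iv => b ++ l.filter (pvPred iv)) init intervals := by
  intro l
  induction l with
  | nil =>
    intro init hlen
    simp only [List.foldl_nil, List.filter_nil, List.append_nil]
    exact (pvZip_fst init intervals hlen).symm
  | cons x t ih =>
    intro init hlen
    simp only [List.foldl_cons]
    rw [ih _ (by simp [hlen]), pvB_fuse]

-- zipWith against the freshly-built empty buckets is a map
theorem pvB_init (f : List Int → Int × Int → List Int) :
    ∀ (c : List (Int × Int)),
      List.zipWith f (c.map (fun _ => ([] : List Int))) c = c.map (fun iv => f [] iv) := by
  intro c
  induction c with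
  | nil => rfl
  | cons iv t ih => simp only [List.map_cons, List.zipWith_cons_cons, ih]

-- ===== VERDICT (by name: the statement is the Claim_ definition above) =====
theorem intervals_sort_spec : Claim_equal_intervals_sort := by
  intro l intervals _
  unfold Spec_intervals_sort intervals_sort intervals_sort_alt
  dsimp only
  rw [pvB_loop intervals l _ (by simp), pvB_init, PySem.List.foldl_append_eq_flatten]
  have hstep : ∀ iv ∈ intervals, ∀ (sort : List Int),
      (sort ++ List.foldl (fun acc (q : Int × Int) =>
          if (PySem.List.pyGet? (List.map (fun x => decide (x ≥ iv.1) && decide (x < iv.2)) l)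
                q.1).getD false = true then acc ++ [q.2] else acc) []
        (PySem.List.enumerate l))
      = sort ++ l.filter (pvPred iv) := by
    intro iv _ sort
    rw [show (0 : Int) = ((0 : Nat) : Int) from rfl] -- enumerate's default start, as a Nat cast
    rw [pvA_inner (pvPred iv) l 0 _ [] ?_]
    · simp
    · intro k h
      simp [pvPred, ge_iff_le, List.getElem?_eq_getElem h]
  have hcong := PySem.List.foldl_congr_mem'
    (l := intervals) (init := ([] : List Int))
    (f := fun sort interval =>
      sort ++ List.foldl (fun acc (q : Int × Int) =>
          if (PySem.List.pyGet? (List.map (fun x => decide (x ≥ interval.1) && decide (x < interval.2)) l)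
                q.1).getD false = true then acc ++ [q.2] else acc) []
        (PySem.List.enumerate l))
    (g := fun sort iv => sort ++ l.filter (pvPred iv)) hstep
  rw [hcong, PySem.List.foldl_append_eq_flatMap]
  simp [List.flatMap_def]
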